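-- pv_equiv track=rewrite | github.com/peterxu1212/group11 | project1/deliverables/codeV2/prepare_features.py | calc_sentence_number_in_comment
-- ===== SOURCE A (Python) =====
-- def calc_sentence_number_in_comment(str_comment):
--
-- 	sentence_count = 0
-- 	seen_end = False
-- 	sentence_end = {'?', '!', '.'}
-- 	for c in str_comment:
-- 		if c in sentence_end:
-- 			if not seen_end:
-- 				seen_end = True
-- 				sentence_count += 1
-- 			continue
-- 		seen_end = False
--
-- 	return sentence_count
-- ===== SOURCE B (Python) =====
-- def calc_sentence_number_in_comment(str_comment):
-- 	# Mask every non-terminator character with a space, then let str.split()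
-- 	# tokenize: each whitespace-separated token is one maximal run of '.!?'.
-- 	masked = ''.join(c if c in '.!?' else ' ' for c in str_comment)
-- 	return len(masked.split())
-- ===== Notes on version B (the rewrite author's own statement) =====
-- stated objective: idiomatic
-- what changed: Replaces the seen_end state-machine loop with a two-stage tokenization: mask every non-terminator character with a space and count the whitespace-separated tokens of str.split(), each token being one maximal run of sentence-ending punctuation.
import Mathlib
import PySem

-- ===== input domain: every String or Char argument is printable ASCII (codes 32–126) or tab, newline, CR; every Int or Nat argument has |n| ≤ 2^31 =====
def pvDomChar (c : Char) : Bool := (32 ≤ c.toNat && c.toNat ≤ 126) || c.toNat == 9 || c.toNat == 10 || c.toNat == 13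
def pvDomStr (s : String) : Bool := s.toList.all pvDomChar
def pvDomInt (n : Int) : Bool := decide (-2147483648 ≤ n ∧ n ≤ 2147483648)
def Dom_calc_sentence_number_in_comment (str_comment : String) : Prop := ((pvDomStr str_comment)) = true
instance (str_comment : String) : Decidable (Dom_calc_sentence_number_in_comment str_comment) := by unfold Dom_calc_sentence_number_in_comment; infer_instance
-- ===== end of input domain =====

-- B replaces A's seen_end state-machine loop with a two-stage tokenization (mask
-- non-terminators with spaces, count whitespace-split tokens): more idiomatic, same cost.


-- ===== PORT A =====
-- A's loop: state (sentence_count, seen_end), branch order as in the Python.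
def pvStepA (st : Int × Bool) (c : Char) : Int × Bool :=
  if c = '?' ∨ c = '!' ∨ c = '.' then
    (if st.2 then st else (st.1 + 1, true))
  else (st.1, false)

def calc_sentence_number_in_comment (str_comment : String) : Int :=
  (str_comment.toList.foldl pvStepA (0, false)).1

-- ===== PORT B =====
-- Source B's membership test `c in '.!?'`
def pvIsEnd (c : Char) : Bool := c = '.' || c = '!' || c = '?'

-- Source B: masked = ''.join(c if c in '.!?' else ' ' for c in str_comment); len(masked.split())
def calc_sentence_number_in_comment_alt (str_comment : String) : Int :=
  ((PySem.Chars.split₀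
      (str_comment.toList.map (fun c => if pvIsEnd c then c else ' '))).length : Nat)

-- ===== PRECONDITION & SPEC =====
def Spec_calc_sentence_number_in_comment (str_comment : String) (out : Int) : Prop := out = calc_sentence_number_in_comment_alt str_comment
instance (str_comment : String) (out : Int) : Decidable (Spec_calc_sentence_number_in_comment str_comment out) := by unfold Spec_calc_sentence_number_in_comment; infer_instance

-- ===== CLAIM (what is proved, stated in full; the proofs are below) =====
def Claim_equal_calc_sentence_number_in_comment : Prop := ∀ (str_comment : String), Dom_calc_sentence_number_in_comment str_comment → Spec_calc_sentence_number_in_comment str_comment (calc_sentence_number_in_comment str_comment)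

-- ===== LEMMAS AND PROOFS =====
-- A's membership test (source order '?','!','.') equals B's pvIsEnd.
theorem pvIsEnd_iff (c : Char) : (c = '?' ∨ c = '!' ∨ c = '.') ↔ pvIsEnd c = true := by
  simp [pvIsEnd]; tauto

-- a terminator character is not whitespace.
theorem pvEnd_not_space (c : Char) (h : pvIsEnd c = true) :
    PySem.Chars.isspace c = false := by
  have hc : c = '.' ∨ c = '!' ∨ c = '?' := by
    have := h; simp [pvIsEnd] at this; tauto
  rcases hc with h'|h'|h' <;> (subst h'; decide)

-- Core invariant: the tokenizer's token count over the masked suffix, offset by the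
-- pending accumulators, equals A's fold (seen_end = "current token nonempty").
theorem pvKey (cs : List Char) (cur : List Char) (acc : List (List Char)) (k : Int) :
    (cs.foldl pvStepA (k, !cur.isEmpty)).1 + acc.length + (if cur.isEmpty then 0 else 1) =
      k + ((PySem.Chars.split₀.go (cs.map (fun c => if pvIsEnd c then c else ' ')) cur acc).length : Nat) := by
  induction cs generalizing cur acc k with
  | nil =>
    cases cur <;> simp [PySem.Chars.split₀.go] <;> omega
  | cons c rest ih =>
    by_cases hc : pvIsEnd c = true
    · have hA : (c = '?' ∨ c = '!' ∨ c = '.') := (pvIsEnd_iff c).2 hc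
      cases hcur : cur.isEmpty with
      | true =>
        have ih' := ih (c :: cur) acc (k + 1)
        simp [pvStepA, hA, hc, PySem.Chars.split₀.go, pvEnd_not_space c hc] at ih' ⊢
        omega
      | false =>
        have ih' := ih (c :: cur) acc k
        simp [pvStepA, hA, hc, PySem.Chars.split₀.go, pvEnd_not_space c hc] at ih' ⊢
        omega
    · have hA : ¬ (c = '?' ∨ c = '!' ∨ c = '.') := fun h => hc ((pvIsEnd_iff c).1 h)
      cases hcur : cur.isEmpty with
      | true =>
        have ih' := ih ([] : List Char) acc k
        simp [pvStepA, hA, hc, hcur, PySem.Chars.split₀.go, PySem.Chars.isspace] at ih' ⊢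
        omega
      | false =>
        have ih' := ih ([] : List Char) (cur.reverse :: acc) k
        simp [pvStepA, hA, hc, hcur, PySem.Chars.split₀.go, PySem.Chars.isspace] at ih' ⊢
        omega

-- ===== VERDICT (by name: the statement is the Claim_ definition above) =====
theorem calc_sentence_number_in_comment_spec : Claim_equal_calc_sentence_number_in_comment := by
  intro s _
  unfold Spec_calc_sentence_number_in_comment calc_sentence_number_in_comment
    calc_sentence_number_in_comment_alt PySem.Chars.split₀
  have h := pvKey s.toList [] [] 0
  simpa using h
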